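-- pv_equiv track=rewrite | github.com/unihd-cag/skillbridge | skillbridge/client/extract.py | _sanitize_body
-- ===== SOURCE A (Python) =====
-- from typing import Iterable, Iterator, List, Dict, Optional, Set, Tuple
--
-- def _sanitize_body(body: Iterable[str]) -> Tuple[str, Set[str]]:
--     lines = [line.strip() for line in body]
--     while lines and not lines[0]:
--         lines = lines[1:]
--     while lines and not lines[-1]:
--         lines.pop()
--
--     for line in lines:
--         if line.startswith('ALIASES '):
--             aliases = set(line[8:].split())
--             break
--     else:
--         aliases = set()
--
--     return '\n'.join(lines), aliases
-- ===== SOURCE B (Python) =====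
-- def _sanitize_body(body):
--     # One pass with accumulators: no intermediate stripped list, no trimming while-loops,
--     # no separate alias scan.
--     parts = []     # the kept lines: non-blank stripped lines plus re-inserted interior blanks
--     pending = 0    # blank lines seen since the last non-blank line
--     aliases = None
--     for raw in body:
--         line = raw.strip()
--         if line:
--             if parts:
--                 parts.extend([''] * pending)
--             pending = 0
--             parts.append(line)
--             if aliases is None and line.startswith('ALIASES '):
--                 aliases = set(line[8:].split())
--         else:
--             pending += 1
--     return ('\n'.join(parts), aliases if aliases is not None else set())
-- ===== Notes on version B (the rewrite author's own statement) =====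
-- stated objective: alternative
-- what changed: Replaces A's strip-into-list plus two trimming while-loops plus a separate for/else alias scan by a single left-to-right pass that accumulates the kept lines, a count of blank lines owed, and the first ALIASES set, joining once at the end.
import Mathlib
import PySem

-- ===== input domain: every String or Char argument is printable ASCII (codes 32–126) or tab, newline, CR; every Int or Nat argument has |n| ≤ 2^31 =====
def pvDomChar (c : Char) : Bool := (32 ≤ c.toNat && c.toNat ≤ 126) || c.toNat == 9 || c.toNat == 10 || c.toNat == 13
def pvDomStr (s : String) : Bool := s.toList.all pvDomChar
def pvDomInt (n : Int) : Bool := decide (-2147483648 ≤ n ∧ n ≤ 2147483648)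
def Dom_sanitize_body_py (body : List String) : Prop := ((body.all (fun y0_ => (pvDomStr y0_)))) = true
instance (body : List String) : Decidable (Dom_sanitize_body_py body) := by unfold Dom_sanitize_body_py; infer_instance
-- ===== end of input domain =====

-- B replaces A's strip-list + two trimming while-loops + separate alias scan by a single
-- left-to-right pass with accumulators (objective: alternative, same cost).

-- ===== PORT A =====
-- while lines and not lines[0]: lines = lines[1:]
def pvTrimFrontA : List String → List String
  | [] => []
  | x :: xs => if x = "" then pvTrimFrontA xs else x :: xs

-- while lines and not lines[-1]: lines.pop()   (structural recursion removing trailing "")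
def pvTrimBackA : List String → List String
  | [] => []
  | x :: xs =>
    match pvTrimBackA xs with
    | [] => if x = "" then [] else [x]
    | y :: ys => x :: y :: ys

-- the for/else scan: first line starting with 'ALIASES ' wins, else set()
def pvScanA : List String → PySem.Set String
  | [] => PySem.Set.ofList []
  | line :: rest =>
    if PySem.Str.startswith line "ALIASES " then
      PySem.Set.ofList (PySem.Str.split₀ (PySem.Str.slice line (some 8) none))
    else pvScanA rest

def sanitize_body_py (body : List String) : String × List String :=
  let lines := pvTrimBackA (pvTrimFrontA (body.map (fun line => PySem.Str.strip line)))
  (PySem.Str.join "\n" lines, pvScanA lines)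

-- ===== PORT B =====
-- one fold step over the raw lines; state = (kept lines, pending blank count, aliases?)
def pvStepB (st : List String × Int × Option (PySem.Set String)) (raw : String) :
    List String × Int × Option (PySem.Set String) :=
  let line := PySem.Str.strip raw
  if line ≠ "" then
    ((if st.1 ≠ [] then st.1 ++ List.replicate st.2.1.toNat "" else st.1) ++ [line],
     0,
     match st.2.2 with
     | none =>
       if PySem.Str.startswith line "ALIASES " then
         some (PySem.Set.ofList (PySem.Str.split₀ (PySem.Str.slice line (some 8) none)))
       else none
     | some a => some a)
  else (st.1, st.2.1 + 1, st.2.2)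

def sanitize_body_py_alt (body : List String) : String × List String :=
  let st := body.foldl pvStepB ([], 0, none)
  (PySem.Str.join "\n" st.1, (st.2.2).getD (PySem.Set.ofList []))

-- ===== PRECONDITION & SPEC =====
def Spec_sanitize_body_py (body : List String) (out : String × List String) : Prop := out = sanitize_body_py_alt body
instance (body : List String) (out : String × List String) : Decidable (Spec_sanitize_body_py body out) := by unfold Spec_sanitize_body_py; infer_instance

-- ===== CLAIM (what is proved, stated in full; the proofs are below) =====
def Claim_equal_sanitize_body_py : Prop := ∀ (body : List String), Dom_sanitize_body_py body → Spec_sanitize_body_py body (sanitize_body_py body)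

-- ===== LEMMAS AND PROOFS =====

-- proof-level helpers
def pvScanOpt : List String → Option (PySem.Set String)
  | [] => none
  | line :: rest =>
    if PySem.Str.startswith line "ALIASES " then
      some (PySem.Set.ofList (PySem.Str.split₀ (PySem.Str.slice line (some 8) none)))
    else pvScanOpt rest

def pvBsl (L : List String) : Nat := (L.reverse.takeWhile (fun s => s = "")).length

-- trimFront facts
theorem pvTrimFrontA_eq_nil (L : List String) :
    pvTrimFrontA L = [] ↔ ∀ s ∈ L, s = "" := by
  induction L with
  | nil => simp [pvTrimFrontA]
  | cons x xs ih =>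
    by_cases hx : x = "" <;> simp [pvTrimFrontA, hx, ih]

theorem pvTrimFrontA_append (L : List String) (x : String) (h : pvTrimFrontA L ≠ []) :
    pvTrimFrontA (L ++ [x]) = pvTrimFrontA L ++ [x] := by
  induction L with
  | nil => simp [pvTrimFrontA] at h
  | cons y ys ih =>
    by_cases hy : y = ""
    · simp only [pvTrimFrontA, hy] at h ⊢
      exact ih h
    · simp [pvTrimFrontA, hy]

theorem pvTrimFrontA_append_nil (L : List String) (x : String) (h : pvTrimFrontA L = []) :
    pvTrimFrontA (L ++ [x]) = if x = "" then [] else [x] := by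
  induction L with
  | nil => simp [pvTrimFrontA]
  | cons y ys ih =>
    by_cases hy : y = ""
    · simp only [pvTrimFrontA, hy] at h ⊢
      exact ih h
    · simp [pvTrimFrontA, hy] at h

-- pvBsl facts
theorem pvBsl_append_blank (L : List String) : pvBsl (L ++ [""]) = pvBsl L + 1 := by
  simp [pvBsl]

theorem pvBsl_append_ne (L : List String) (x : String) (h : x ≠ "") : pvBsl (L ++ [x]) = 0 := by
  simp [pvBsl, h]

theorem pvBsl_trimFront (L : List String) (h : pvTrimFrontA L ≠ []) :
    pvBsl (pvTrimFrontA L) = pvBsl L := by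
  induction L with
  | nil => rfl
  | cons x xs ih =>
    by_cases hx : x = ""
    · subst hx
      have hT : pvTrimFrontA ("" :: xs) = pvTrimFrontA xs := by simp [pvTrimFrontA]
      rw [hT] at h ⊢
      rw [ih h]
      have hxs : ¬ (∀ s ∈ xs, s = "") := fun hall => h ((pvTrimFrontA_eq_nil xs).mpr hall)
      -- blank suffix of ("" :: xs) equals that of xs since xs is not all-blank
      have hne : xs.reverse.takeWhile (fun s => s = "") ≠ xs.reverse := by
        intro he
        apply hxs
        intro s hs
        have hs' : s ∈ xs.reverse := by simpa using hs
        rw [← he] at hs'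
        simpa using List.mem_takeWhile_imp hs' 
      simp only [pvBsl, List.reverse_cons, List.takeWhile_append]
      split
      · next hlen =>
        exact absurd ((List.takeWhile_prefix _).eq_of_length hlen) hne
      · rfl
    · simp [pvTrimFrontA, hx]

-- trimBack facts
theorem pvTrimBackA_append_ne (M : List String) (x : String) (h : x ≠ "") :
    pvTrimBackA (M ++ [x]) = M ++ [x] := by
  induction M with
  | nil => simp [pvTrimBackA, h]
  | cons y ys ih =>
    simp only [List.cons_append, pvTrimBackA, ih]
    cases hys : ys ++ [x] with
    | nil => simp at hys
    | cons a as => rfl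

theorem pvTrimBackA_append_blank (M : List String) :
    pvTrimBackA (M ++ [""]) = pvTrimBackA M := by
  induction M with
  | nil => simp [pvTrimBackA]
  | cons y ys ih =>
    simp only [List.cons_append, pvTrimBackA, ih]

theorem pvTrimBackA_eq_nil (M : List String) :
    pvTrimBackA M = [] ↔ ∀ s ∈ M, s = "" := by
  induction M with
  | nil => simp [pvTrimBackA]
  | cons x xs ih =>
    simp only [pvTrimBackA]
    cases hb : pvTrimBackA xs with
    | nil =>
      have hxs : ∀ s ∈ xs, s = "" := ih.mp hb
      by_cases hx : x = ""
      · simpa [hx] using hxs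
      · simp [hx]
    | cons a as =>
      have : ¬ (∀ s ∈ xs, s = "") := fun hall => by simp [ih.mpr hall] at hb
      simp only [List.mem_cons]
      constructor
      · intro hc; exact absurd hc (by simp)
      · intro hall
        exact absurd (fun s hs => hall s (Or.inr hs)) this

theorem pvTrimBackA_spec (M : List String) :
    M = pvTrimBackA M ++ List.replicate (pvBsl M) "" := by
  induction M using List.reverseRecOn with
  | nil => simp [pvTrimBackA, pvBsl]
  | append_singleton ys x ih =>
    by_cases hx : x = ""
    · subst hx
      rw [pvTrimBackA_append_blank, pvBsl_append_blank, List.replicate_succ',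
        ← List.append_assoc, ← ih]
    · rw [pvTrimBackA_append_ne ys x hx, pvBsl_append_ne ys x hx]
      simp

-- scan facts
theorem pvScanA_eq_scanOpt (l : List String) :
    pvScanA l = (pvScanOpt l).getD (PySem.Set.ofList []) := by
  induction l with
  | nil => rfl
  | cons line rest ih =>
    simp only [pvScanA, pvScanOpt]
    by_cases hl : PySem.Str.startswith line "ALIASES " = true
    · rw [if_pos hl, if_pos hl, Option.getD_some]
    · rw [if_neg hl, if_neg hl]; exact ih

theorem pvScanOpt_append (L : List String) (x : String) :
    pvScanOpt (L ++ [x]) =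
      match pvScanOpt L with
      | some a => some a
      | none => pvScanOpt [x] := by
  induction L with
  | nil => rfl
  | cons line rest ih =>
    simp only [List.cons_append, pvScanOpt]
    by_cases hl : PySem.Str.startswith line "ALIASES " = true
    · rw [if_pos hl, if_pos hl]
    · rw [if_neg hl, if_neg hl]; exact ih

theorem pvScanOpt_append_blank (L : List String) : pvScanOpt (L ++ [""]) = pvScanOpt L := by
  rw [pvScanOpt_append]
  have h1 : pvScanOpt [""] = none := rfl
  cases hy : pvScanOpt L
  · simpa [hy] using h1.symm
  · simp

theorem pvScanOpt_all_blank (L : List String) (h : ∀ s ∈ L, s = "") : pvScanOpt L = none := by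
  induction L with
  | nil => rfl
  | cons x xs ih =>
    have hx : x = "" := h x (by simp)
    subst hx
    rw [pvScanOpt, if_neg (by decide)]
    exact ih (fun s hs => h s (by simp [hs]))

theorem pvScanOpt_single (x : String) :
    pvScanOpt [x] = (if PySem.Str.startswith x "ALIASES " then
      some (PySem.Set.ofList (PySem.Str.split₀ (PySem.Str.slice x (some 8) none)))
    else none) := by
  rw [pvScanOpt]
  split <;> rfl

theorem pvTrimFrontA_head (L : List String) :
    pvTrimFrontA L = [] ∨ ∃ h t, pvTrimFrontA L = h :: t ∧ h ≠ "" := by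
  induction L with
  | nil => exact Or.inl rfl
  | cons x xs ih =>
    by_cases hx : x = ""
    · simpa [pvTrimFrontA, hx] using ih
    · exact Or.inr ⟨x, xs, by simp [pvTrimFrontA, hx], hx⟩

theorem pvTrimBackA_trimFront_ne_nil (L : List String) (h : pvTrimFrontA L ≠ []) :
    pvTrimBackA (pvTrimFrontA L) ≠ [] := by
  rcases pvTrimFrontA_head L with h0 | ⟨a, t, he, ha⟩
  · exact absurd h0 h
  · intro hb
    exact ha ((pvTrimBackA_eq_nil _).mp hb a (by simp [he]))

theorem pvScanOpt_trimFront (L : List String) :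
    pvScanOpt (pvTrimFrontA L) = pvScanOpt L := by
  induction L with
  | nil => rfl
  | cons x xs ih =>
    by_cases hx : x = ""
    · subst hx
      have hT : pvTrimFrontA ("" :: xs) = pvTrimFrontA xs := by simp [pvTrimFrontA]
      rw [hT, ih]
      conv_rhs => rw [pvScanOpt]
      rw [if_neg (by decide)]
    · simp [pvTrimFrontA, hx]

theorem pvScanOpt_trimBack (L : List String) :
    pvScanOpt (pvTrimBackA L) = pvScanOpt L := by
  induction L using List.reverseRecOn with
  | nil => rfl
  | append_singleton ys x ih =>
    by_cases hx : x = ""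
    · subst hx
      rw [pvTrimBackA_append_blank, ih, pvScanOpt_append]
      have h1 : pvScanOpt [""] = none := rfl
      cases hy : pvScanOpt ys
      · simpa [hy] using h1.symm
      · simp
    · rw [pvTrimBackA_append_ne ys x hx]

-- the main fold invariant, over the already-stripped lines
theorem pvFold_inv (L : List String) :
    L.foldl (fun st line =>
      if line ≠ "" then
        ((if st.1 ≠ [] then st.1 ++ List.replicate st.2.1.toNat "" else st.1) ++ [line],
         0,
         match st.2.2 with
         | none =>
           if PySem.Str.startswith line "ALIASES " then
             some (PySem.Set.ofList (PySem.Str.split₀ (PySem.Str.slice line (some 8) none)))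
           else none
         | some a => some a)
      else (st.1, st.2.1 + 1, st.2.2))
      (([] : List String), (0 : Int), (none : Option (PySem.Set String))) =
    (pvTrimBackA (pvTrimFrontA L), ((pvBsl L : Int)), pvScanOpt L) := by
  induction L using List.reverseRecOn with
  | nil => rfl
  | append_singleton L x ih =>
    rw [List.foldl_append, ih, List.foldl_cons, List.foldl_nil]
    by_cases hx : x = ""
    · subst hx
      rw [if_neg (by simp)]
      refine Prod.ext ?_ (Prod.ext ?_ ?_)
      · show pvTrimBackA (pvTrimFrontA L) = pvTrimBackA (pvTrimFrontA (L ++ [""]))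
        by_cases hF : pvTrimFrontA L = []
        · rw [pvTrimFrontA_append_nil L "" hF, if_pos rfl, hF]
        · rw [pvTrimFrontA_append L "" hF, pvTrimBackA_append_blank]
      · show ((pvBsl L : Int) + 1) = (pvBsl (L ++ [""]) : Int)
        rw [pvBsl_append_blank]
        push_cast
        ring
      · show pvScanOpt L = pvScanOpt (L ++ [""])
        rw [pvScanOpt_append_blank]
    · rw [if_pos (by simpa using hx)]
      have hsc : pvScanOpt (L ++ [x]) =
          (match pvScanOpt L with
           | some a => some a
           | none => if PySem.Str.startswith x "ALIASES " then
               some (PySem.Set.ofList (PySem.Str.split₀ (PySem.Str.slice x (some 8) none)))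
             else none) := by
        rw [pvScanOpt_append, pvScanOpt_single]
      refine Prod.ext ?_ (Prod.ext ?_ ?_)
      · show (if pvTrimBackA (pvTrimFrontA L) ≠ [] then
            pvTrimBackA (pvTrimFrontA L) ++ List.replicate (pvBsl L : Int).toNat ""
          else pvTrimBackA (pvTrimFrontA L)) ++ [x] = pvTrimBackA (pvTrimFrontA (L ++ [x]))
        by_cases hF : pvTrimFrontA L = []
        · have hB0 : pvTrimBackA (pvTrimFrontA L) = [] := by
            rw [hF]; rfl
          rw [pvTrimFrontA_append_nil L x hF, if_neg hx, hB0, if_neg (by simp),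
            List.nil_append]
          have hB : pvTrimBackA [x] = [x] := by
            simpa using pvTrimBackA_append_ne [] x hx
          exact hB.symm
        · have hBne : pvTrimBackA (pvTrimFrontA L) ≠ [] :=
            pvTrimBackA_trimFront_ne_nil L hF
          rw [pvTrimFrontA_append L x hF, pvTrimBackA_append_ne _ x hx, if_pos hBne]
          have hspec := pvTrimBackA_spec (pvTrimFrontA L)
          rw [pvBsl_trimFront L hF] at hspec
          rw [Int.toNat_natCast, ← hspec]
      · show (0 : Int) = (pvBsl (L ++ [x]) : Int)
        rw [pvBsl_append_ne L x hx]
        rfl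
      · show _ = pvScanOpt (L ++ [x])
        rw [hsc]
        by_cases hF : pvTrimFrontA L = []
        · have : pvScanOpt L = none :=
            pvScanOpt_all_blank L ((pvTrimFrontA_eq_nil L).mp hF)
          simp [this]
        · cases hsL : pvScanOpt L <;> simp

-- ===== VERDICT (by name: the statement is the Claim_ definition above) =====
theorem sanitize_body_py_spec : Claim_equal_sanitize_body_py := by
  intro body _
  unfold Spec_sanitize_body_py
  simp only [sanitize_body_py, sanitize_body_py_alt]
  have hinv := pvFold_inv (body.map (fun line => PySem.Str.strip line))
  rw [List.foldl_map] at hinv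
  have hfold : body.foldl pvStepB (([] : List String), (0 : Int), (none : Option (PySem.Set String))) =
      (pvTrimBackA (pvTrimFrontA (body.map (fun line => PySem.Str.strip line))),
       ((pvBsl (body.map (fun line => PySem.Str.strip line)) : Int)),
       pvScanOpt (body.map (fun line => PySem.Str.strip line))) := hinv
  rw [hfold]
  refine Prod.ext rfl ?_
  show pvScanA (pvTrimBackA (pvTrimFrontA (body.map (fun line => PySem.Str.strip line)))) =
    (pvScanOpt (body.map (fun line => PySem.Str.strip line))).getD (PySem.Set.ofList [])
  rw [pvScanA_eq_scanOpt, pvScanOpt_trimBack, pvScanOpt_trimFront]
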